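-- pv_equiv track=rewrite | github.com/lumingya/universal-web-api | app/services/tool_calling.py | _should_insert_missing_comma_before_key
-- ===== SOURCE A (Python) =====
-- from typing import Any, Awaitable, Callable, Dict, Iterable, List, Optional, Tuple
--
-- def _should_insert_missing_comma_before_key(repaired: List[str]) -> bool:
--     i = len(repaired) - 1
--     while i >= 0:
--         token = repaired[i]
--         if not token:
--             i -= 1
--             continue
--         for ch in reversed(token):
--             if ch.isspace():
--                 continue
--             return ch not in {"{", "[", ",", ":"}
--         i -= 1
--     return False
-- ===== SOURCE B (Python) =====
-- def _should_insert_missing_comma_before_key(repaired):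
--     s = "".join(repaired).rstrip()
--     return bool(s) and s[-1] not in {"{", "[", ",", ":"}
-- ===== Notes on version B (the rewrite author's own statement) =====
-- stated objective: simpler
-- what changed: Replaces the explicit backward while-loop over tokens with a nested reversed char scan by a three-step pipeline: join all tokens into one string, rstrip trailing whitespace, test the last character.
import Mathlib
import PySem

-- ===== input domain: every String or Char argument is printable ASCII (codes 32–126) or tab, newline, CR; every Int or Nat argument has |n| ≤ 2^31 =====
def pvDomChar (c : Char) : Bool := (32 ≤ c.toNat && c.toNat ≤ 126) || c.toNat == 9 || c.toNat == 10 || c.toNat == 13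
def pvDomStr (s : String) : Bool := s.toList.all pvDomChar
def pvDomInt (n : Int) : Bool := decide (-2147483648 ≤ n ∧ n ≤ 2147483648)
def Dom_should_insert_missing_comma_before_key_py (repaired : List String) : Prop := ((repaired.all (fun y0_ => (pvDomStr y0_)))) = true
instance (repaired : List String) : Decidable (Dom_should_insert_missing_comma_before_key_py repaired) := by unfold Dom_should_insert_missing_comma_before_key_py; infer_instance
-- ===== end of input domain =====

-- B replaces A's explicit backward token/char scans by join + rstrip + last-character test (simpler decomposition, same cost).
-- ===== PORT A =====
-- inner 'for ch in reversed(token)': skip whitespace, return the membership test on the first non-space char (none = loop fell through)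
def pvInnerScanA : List Char → Option Bool
  | [] => none
  | c :: rest =>
    if PySem.Chars.isspace c then pvInnerScanA rest
    else some (decide (c ∉ (['{', '[', ',', ':'] : List Char)))

-- the 'while i >= 0' loop, walking the list from the back (argument is repaired reversed)
def pvOuterScanA : List String → Bool
  | [] => false
  | token :: rest =>
    if token.toList.isEmpty then pvOuterScanA rest
    else
      match pvInnerScanA token.toList.reverse with
      | some b => b
      | none => pvOuterScanA rest

def should_insert_missing_comma_before_key_py (repaired : List String) : Bool :=
  pvOuterScanA repaired.reverse

-- ===== PORT B =====
def should_insert_missing_comma_before_key_py_alt (repaired : List String) : Bool :=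
  let s := PySem.Chars.rstrip (PySem.Chars.join [] (repaired.map String.toList))
  match s.getLast? with           -- bool(s) and s[-1] not in {...}
  | none => false
  | some c => decide (c ∉ (['{', '[', ',', ':'] : List Char))

-- ===== PRECONDITION & SPEC =====
def Spec_should_insert_missing_comma_before_key_py (repaired : List String) (out : Bool) : Prop := out = should_insert_missing_comma_before_key_py_alt repaired
instance (repaired : List String) (out : Bool) : Decidable (Spec_should_insert_missing_comma_before_key_py repaired out) := by unfold Spec_should_insert_missing_comma_before_key_py; infer_instance

-- ===== CLAIM (what is proved, stated in full; the proofs are below) =====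
def Claim_equal_should_insert_missing_comma_before_key_py : Prop := ∀ (repaired : List String), Dom_should_insert_missing_comma_before_key_py repaired → Spec_should_insert_missing_comma_before_key_py repaired (should_insert_missing_comma_before_key_py repaired)

-- ===== LEMMAS AND PROOFS =====
-- B's result, re-expressed on the reversed character list: first non-space char from the back
def pvBackTest (cs : List Char) : Bool :=
  match (cs.reverse.dropWhile PySem.Chars.isspace).head? with
  | none => false
  | some c => decide (c ∉ (['{', '[', ',', ':'] : List Char))

theorem pvJoinNilFlatten (l : List (List Char)) :
    PySem.Chars.join [] l = l.flatten := by
  induction l with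
  | nil => rfl
  | cons x xs ih =>
    cases xs with
    | nil => simp [PySem.Chars.join, List.intercalate]
    | cons y ys =>
      simp only [PySem.Chars.join] at ih ⊢
      simp [List.intercalate, List.intersperse] at ih ⊢
      simpa using ih

theorem pvAltEqBackTest (repaired : List String) :
    should_insert_missing_comma_before_key_py_alt repaired
      = pvBackTest ((repaired.map String.toList).flatten) := by
  unfold should_insert_missing_comma_before_key_py_alt pvBackTest
  rw [pvJoinNilFlatten]
  simp [PySem.Chars.rstrip, List.getLast?_reverse]

theorem pvInnerScanA_eq (rs : List Char) :
    pvInnerScanA rs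
      = (rs.dropWhile PySem.Chars.isspace).head?.map
          (fun c => decide (c ∉ (['{', '[', ',', ':'] : List Char))) := by
  induction rs with
  | nil => rfl
  | cons c rest ih =>
    by_cases h : PySem.Chars.isspace c
    · simp [pvInnerScanA, List.dropWhile, h, ih]
    · simp [pvInnerScanA, List.dropWhile, h]

theorem pvBackTest_append (as bs : List Char) :
    pvBackTest (as ++ bs)
      = match (bs.reverse.dropWhile PySem.Chars.isspace).head? with
        | some c => decide (c ∉ (['{', '[', ',', ':'] : List Char))
        | none => pvBackTest as := by
  unfold pvBackTest
  rw [List.reverse_append, List.dropWhile_append]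
  cases h : bs.reverse.dropWhile PySem.Chars.isspace <;> simp

theorem pvOuterScanA_eq (ts : List String) :
    pvOuterScanA ts.reverse = pvBackTest ((ts.map String.toList).flatten) := by
  induction ts using List.reverseRecOn with
  | nil => rfl
  | append_singleton ts t ih =>
    rw [List.reverse_append]
    simp only [List.reverse_singleton, List.singleton_append, List.map_append,
      List.map_cons, List.map_nil, List.flatten_append, List.flatten_cons,
      List.flatten_nil, List.append_nil]
    rw [pvBackTest_append]
    show pvOuterScanA (t :: ts.reverse) = _
    unfold pvOuterScanA
    rw [pvInnerScanA_eq]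
    cases hdw : t.toList.reverse.dropWhile PySem.Chars.isspace with
    | nil => by_cases he : t.toList.isEmpty <;> simp [he, ih]
    | cons d ds =>
      have he : ¬ t.toList.isEmpty := by
        intro h
        simp [List.isEmpty_iff] at h
        simp [h] at hdw
      simp [he]

-- ===== VERDICT (by name: the statement is the Claim_ definition above) =====
theorem should_insert_missing_comma_before_key_py_spec : Claim_equal_should_insert_missing_comma_before_key_py := by
  intro repaired _
  unfold Spec_should_insert_missing_comma_before_key_py should_insert_missing_comma_before_key_py
  rw [pvAltEqBackTest]
  exact pvOuterScanA_eq repaired
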